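-- pv_equiv track=rewrite | github.com/Dr0x3525/Proyecto-final-programacion | ejercicios_parciales/ejercicios_recuperacion_parcial_1/ejercicio_1.py | encontrar_fib_menor
-- ===== SOURCE A (Python) =====
-- def comprobar_ser_fibbonaci(numero):
--     numero = int(numero)
--     f1 = 0
--     f2 = 1
--     while f1 <= numero:
--         if f1 == numero:
--             return True
--         temp =  f1
--         f1 = f2
--         f2 = f1 + temp
--     return False
--
-- def encontrar_fib_menor(vector):
--     fib_menor = None
--     for numero in vector:
--         if comprobar_ser_fibbonaci(numero):
--             if fib_menor == None:
--               fib_menor = numero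
--             else:
--                 if fib_menor > numero:
--                     fib_menor = numero
--     return fib_menor
-- ===== SOURCE B (Python) =====
-- def encontrar_fib_menor(vector):
--     # Precompute the set of Fibonacci numbers up to max(vector) once,
--     # then a single min-scan with O(1) membership tests.
--     m = max(vector, default=-1)
--     fibs = set()
--     a, b = 0, 1
--     while a <= m:
--         fibs.add(a)
--         a, b = b, a + b
--     fib_menor = None
--     for x in vector:
--         if x in fibs:
--             if fib_menor is None or fib_menor > x:
--                 fib_menor = x
--     return fib_menor
-- ===== Notes on version B (the rewrite author's own statement) =====
-- stated objective: faster
-- what changed: B builds the set of Fibonacci numbers up to max(vector) once and then does a single min-scan with O(1) set membership, instead of A's per-element while-loop regenerating the Fibonacci sequence for every entry.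
import Mathlib
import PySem

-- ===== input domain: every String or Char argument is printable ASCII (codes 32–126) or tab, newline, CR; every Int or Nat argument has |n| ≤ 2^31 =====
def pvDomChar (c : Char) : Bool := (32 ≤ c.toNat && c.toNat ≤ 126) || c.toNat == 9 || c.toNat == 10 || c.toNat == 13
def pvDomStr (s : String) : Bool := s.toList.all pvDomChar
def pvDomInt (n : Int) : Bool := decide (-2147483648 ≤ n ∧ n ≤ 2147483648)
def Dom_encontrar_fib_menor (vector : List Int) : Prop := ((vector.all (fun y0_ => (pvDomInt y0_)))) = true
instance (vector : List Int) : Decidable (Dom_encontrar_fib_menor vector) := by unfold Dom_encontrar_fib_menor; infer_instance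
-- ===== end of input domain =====

-- B precomputes the set of Fibonacci numbers up to max(vector) once and does a single
-- min-scan with set membership, instead of regenerating the Fibonacci sequence per element.


-- ===== PORT A =====
-- A's while-loop, with fuel: 100 iterations are never exhausted for |numero| ≤ 2^31
-- (the Fibonacci sequence exceeds 2^31 after 47 steps), so this is exact on the domain.
def pvFibCheck : Nat → Int → Int → Int → Bool
  | 0, _, _, _ => false
  | fuel + 1, numero, f1, f2 =>
    if f1 ≤ numero then
      if f1 = numero then true
      else pvFibCheck fuel numero f2 (f2 + f1)
    else false

def comprobar_ser_fibbonaci (numero : Int) : Bool := pvFibCheck 100 numero 0 1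

def encontrar_fib_menor (vector : List Int) : Option Int :=
  vector.foldl (fun fib_menor numero =>
    if comprobar_ser_fibbonaci numero then
      match fib_menor with
      | none => some numero
      | some fm => if fm > numero then some numero else fib_menor
    else fib_menor) none

-- ===== PORT B =====
-- B's generation loop, with the same fuel bound (never exhausted for m ≤ 2^31).
def pvFibsUpTo : Nat → Int → Int → Int → List Int
  | 0, _, _, _ => []
  | fuel + 1, m, a, b => if a ≤ m then a :: pvFibsUpTo fuel m b (b + a) else []

def encontrar_fib_menor_alt (vector : List Int) : Option Int :=
  let m := PySem.List.maxD vector (fun x => x) (-1)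
  let fibs : PySem.Set Int := PySem.Set.ofList (pvFibsUpTo 100 m 0 1)
  vector.foldl (fun fib_menor x =>
    if PySem.Set.contains fibs x then
      match fib_menor with
      | none => some x
      | some fm => if fm > x then some x else fib_menor
    else fib_menor) none

-- ===== PRECONDITION & SPEC =====
def Spec_encontrar_fib_menor (vector : List Int) (out : Option Int) : Prop := out = encontrar_fib_menor_alt vector
instance (vector : List Int) (out : Option Int) : Decidable (Spec_encontrar_fib_menor vector out) := by unfold Spec_encontrar_fib_menor; infer_instance

-- ===== CLAIM (what is proved, stated in full; the proofs are below) =====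
def Claim_equal_encontrar_fib_menor : Prop := ∀ (vector : List Int), Dom_encontrar_fib_menor vector → Spec_encontrar_fib_menor vector (encontrar_fib_menor vector)

-- ===== LEMMAS AND PROOFS =====

-- every element generated from state (a, b) is ≥ a (the sequence never decreases)
theorem pvFibsUpTo_ge (fuel : Nat) (m a b x : Int) (ha : 0 ≤ a) (hab : a ≤ b)
    (hx : x ∈ pvFibsUpTo fuel m a b) : a ≤ x := by
  induction fuel generalizing a b with
  | zero => simp [pvFibsUpTo] at hx
  | succ fuel ih =>
    simp only [pvFibsUpTo] at hx
    split at hx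
    · rcases List.mem_cons.mp hx with h | h
      · omega
      · have := ih b (b + a) (by omega) (by omega) h
        omega
    · simp at hx

-- membership in the generated list agrees with A's check, for any n ≤ m
theorem pvFibsUpTo_mem_iff (fuel : Nat) (m n a b : Int) (hnm : n ≤ m) (ha : 0 ≤ a)
    (hab : a ≤ b) : (n ∈ pvFibsUpTo fuel m a b) ↔ pvFibCheck fuel n a b = true := by
  induction fuel generalizing a b with
  | zero => simp [pvFibsUpTo, pvFibCheck]
  | succ fuel ih =>
    simp only [pvFibsUpTo, pvFibCheck]
    by_cases han : a ≤ n
    · have ham : a ≤ m := le_trans han hnm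
      simp only [if_pos ham, if_pos han, List.mem_cons]
      by_cases heq : a = n
      · simp [heq]
      · simp only [if_neg heq]
        constructor
        · rintro (h | h)
          · exact absurd h.symm heq
          · exact (ih b (b + a) (by omega) (by omega)).mp h
        · intro h
          exact Or.inr ((ih b (b + a) (by omega) (by omega)).mpr h)
    · simp only [if_neg han]
      constructor
      · intro h
        split at h
        · rcases List.mem_cons.mp h with h | h
          · omega
          · have := pvFibsUpTo_ge fuel m b (b + a) n (by omega) (by omega) h
            omega
        · simp at h
      · intro h
        exact absurd h (by simp)

-- the two folds agree whenever the predicates agree on every element of the list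
theorem pvFold_congr (p q : Int → Bool) (l : List Int) (h : ∀ x ∈ l, p x = q x) :
    ∀ acc : Option Int,
      l.foldl (fun fm x => if p x then
          match fm with
          | none => some x
          | some v => if v > x then some x else fm
        else fm) acc =
      l.foldl (fun fm x => if q x then
          match fm with
          | none => some x
          | some v => if v > x then some x else fm
        else fm) acc := by
  induction l with
  | nil => intro acc; rfl
  | cons y t ih =>
    intro acc
    simp only [List.foldl_cons]
    rw [h y (List.mem_cons_self)]
    exact ih (fun x hx => h x (List.mem_cons_of_mem _ hx)) _

-- ===== VERDICT (by name: the statement is the Claim_ definition above) =====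
theorem encontrar_fib_menor_spec : Claim_equal_encontrar_fib_menor := by
  intro vector _
  unfold Spec_encontrar_fib_menor encontrar_fib_menor encontrar_fib_menor_alt
  apply pvFold_congr
  intro x hx
  have hxm : x ≤ PySem.List.maxD vector (fun a => a) (-1) :=
    PySem.List.le_maxD_id vector (-1) x hx
  have hmem := pvFibsUpTo_mem_iff 100 (PySem.List.maxD vector (fun a => a) (-1)) x 0 1 hxm
    (by omega) (by omega)
  unfold comprobar_ser_fibbonaci
  by_cases hc : pvFibCheck 100 x 0 1 = true
  · rw [hc]
    have hx' : x ∈ pvFibsUpTo 100 (PySem.List.maxD vector (fun a => a) (-1)) 0 1 := hmem.mpr hc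
    simp [PySem.Set.mem_ofList, hx']
  · rw [Bool.not_eq_true] at hc
    rw [hc]
    have hx' : x ∉ pvFibsUpTo 100 (PySem.List.maxD vector (fun a => a) (-1)) 0 1 := by
      intro h; exact absurd (hmem.mp h) (by simp [hc])
    simp [PySem.Set.mem_ofList, hx']
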